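-- pv_equiv track=rewrite | github.com/nithinveer/leetcode-solutions | Minimum Deletion Cost to Avoid Repeating Letters.py | minCostold
-- ===== SOURCE A (Python) =====
-- def minCostold(s, cost):
--     """
--     :type s: str
--     :type cost: List[int]
--     :rtype: int
--     """
--     rtn = 0
--
--     def remove(i,j):
--         odd = 0
--         even = 0
--         for p in range(i, j+1):
--             if p%2==0:
--                 even += cost[p]
--             else:
--                 odd += cost[p]
--         return min(odd, even)
--
--     l = 0
--     r = 0
--     last = s[0]
--     for i in range(1, len(cost)):
--         if s[i] == last:
--             r+=1
--         else:
--             if l != r: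
--                 rtn +=remove(l,r)
--             last = s[i]
--             l = i
--             r = i
--     if l != r:
--         rtn += remove(l, r)
--     return rtn
-- ===== SOURCE B (Python) =====
-- def minCostold(s, cost):
--     """
--     :type s: str
--     :type cost: List[int]
--     :rtype: int
--     """
--     rtn = 0
--     even = 0
--     odd = 0
--     run = 0
--     prev = None
--     for i in range(len(cost)):
--         c = s[i]
--         if prev == c:
--             run += 1
--         else:
--             if run > 1:
--                 rtn += min(even, odd)
--             even = 0
--             odd = 0
--             run = 1
--             prev = c
--         if i % 2 == 0:
--             even += cost[i]
--         else:
--             odd += cost[i]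
--     if run > 1:
--         rtn += min(even, odd)
--     return rtn
-- ===== Notes on version B (the rewrite author's own statement) =====
-- stated objective: simpler
-- what changed: Replaces the (l,r) run-boundary tracking plus the second-scan remove() helper with a single pass that maintains the current run's even-index and odd-index cost sums incrementally, flushing min(even,odd) when the character changes; the nested re-scan and the helper disappear.
import Mathlib
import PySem

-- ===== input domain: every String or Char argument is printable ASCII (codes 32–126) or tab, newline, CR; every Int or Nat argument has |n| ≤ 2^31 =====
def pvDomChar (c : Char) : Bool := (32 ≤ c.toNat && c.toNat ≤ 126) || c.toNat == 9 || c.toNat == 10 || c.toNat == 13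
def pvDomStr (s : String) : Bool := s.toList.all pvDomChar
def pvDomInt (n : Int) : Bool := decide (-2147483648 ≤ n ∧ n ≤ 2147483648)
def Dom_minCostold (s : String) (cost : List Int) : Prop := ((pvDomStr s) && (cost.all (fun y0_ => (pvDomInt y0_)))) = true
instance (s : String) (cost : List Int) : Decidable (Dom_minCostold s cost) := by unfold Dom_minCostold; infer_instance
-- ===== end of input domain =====

-- B replaces A's (l,r) boundary tracking + re-scanning remove() helper with one pass keeping the
-- current run's even/odd cost sums incrementally (objective: simpler, no nested second scan).

-- ===== PORT A =====
-- the inner helper remove(i, j): scan cost[i..j], return min(odd, even)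
def rstepA (cost : List Int) (oe : Int × Int) (p : Int) : Int × Int :=
  if PySem.Int.mod p 2 == 0 then (oe.1, oe.2 + PySem.List.pyGetD cost p 0)
  else (oe.1 + PySem.List.pyGetD cost p 0, oe.2)

def removeA (cost : List Int) (i j : Int) : Int :=
  let oe := (PySem.List.pyRange i (j + 1) 1).foldl (rstepA cost) (0, 0)
  min oe.1 oe.2

structure StA where
  rtn : Int
  l : Int
  r : Int
  last : Char
deriving Repr, DecidableEq

def stepA (sl : List Char) (cost : List Int) (st : StA) (i : Int) : StA :=
  match PySem.List.pyGet? sl i with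
  | none => st   -- Python raises IndexError here; excluded by Pre_
  | some c =>
    if c == st.last then { st with r := st.r + 1 }
    else { rtn := if st.l ≠ st.r then st.rtn + removeA cost st.l st.r else st.rtn,
           l := i, r := i, last := c }

def minCostold (s : String) (cost : List Int) : Int :=
  match PySem.List.pyGet? s.toList 0 with
  | none => 0   -- Python raises IndexError on empty s; excluded by Pre_
  | some c0 =>
    let st := (PySem.List.pyRange 1 (cost.length : Int) 1).foldl (stepA s.toList cost) ⟨0, 0, 0, c0⟩
    if st.l ≠ st.r then st.rtn + removeA cost st.l st.r else st.rtn

-- ===== PORT B =====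
structure StB where
  rtn : Int
  even : Int
  odd : Int
  run : Int
  prev : Option Char
deriving Repr, DecidableEq

def stepB (sl : List Char) (cost : List Int) (st : StB) (i : Int) : StB :=
  match PySem.List.pyGet? sl i with
  | none => st   -- Python raises IndexError here; excluded by Pre_
  | some c =>
    let st1 : StB :=
      if st.prev == some c then { st with run := st.run + 1 }
      else { rtn := if st.run > 1 then st.rtn + min st.even st.odd else st.rtn,
             even := 0, odd := 0, run := 1, prev := some c }
    if PySem.Int.mod i 2 == 0 then { st1 with even := st1.even + PySem.List.pyGetD cost i 0 }
    else { st1 with odd := st1.odd + PySem.List.pyGetD cost i 0 }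

def minCostold_alt (s : String) (cost : List Int) : Int :=
  let st := (PySem.List.pyRange 0 (cost.length : Int) 1).foldl (stepB s.toList cost) ⟨0, 0, 0, 0, none⟩
  if st.run > 1 then st.rtn + min st.even st.odd else st.rtn

-- ===== PRECONDITION & SPEC =====
-- A reads s[0] unconditionally and s[i] for every i < len(cost): it raises IndexError exactly
-- when s is empty or cost is longer than s; Pre_ excludes exactly those inputs.
def Pre_minCostold (s : String) (cost : List Int) : Prop :=
  s.toList ≠ [] ∧ cost.length ≤ s.toList.length
instance (s : String) (cost : List Int) : Decidable (Pre_minCostold s cost) := by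
  unfold Pre_minCostold; infer_instance

def pvWitness_minCostold : String × List Int := ("aab", [1, 2, 3])

def Spec_minCostold (s : String) (cost : List Int) (out : Int) : Prop := out = minCostold_alt s cost
instance (s : String) (cost : List Int) (out : Int) : Decidable (Spec_minCostold s cost out) := by
  unfold Spec_minCostold; infer_instance

-- ===== CLAIM (what is proved, stated in full; the proofs are below) =====
def Claim_equal_minCostold : Prop := ∀ (s : String) (cost : List Int), Dom_minCostold s cost → Pre_minCostold s cost → Spec_minCostold s cost (minCostold s cost)

-- ===== LEMMAS AND PROOFS =====

def rsums (cost : List Int) (l r : Int) : Int × Int :=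
  (PySem.List.pyRange l (r + 1) 1).foldl (rstepA cost) (0, 0)

lemma removeA_eq (cost : List Int) (l r : Int) :
    removeA cost l r = min (rsums cost l r).1 (rsums cost l r).2 := rfl

lemma rsums_self (cost : List Int) (l : Int) : rsums cost l l = rstepA cost (0, 0) l := by
  unfold rsums
  rw [PySem.List.pyRange_one_singleton]
  rfl

lemma rsums_succ (cost : List Int) (l r : Int) (h : l ≤ r + 1) :
    rsums cost l (r + 1) = rstepA cost (rsums cost l r) (r + 1) := by
  unfold rsums
  rw [PySem.List.pyRange_one_succ_right h, List.foldl_append]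
  rfl

-- the invariant tying A's run-boundary state to B's incremental-sum state
def RelAB (cost : List Int) (a : StA) (b : StB) : Prop :=
  a.rtn = b.rtn ∧ 0 ≤ a.l ∧ a.l ≤ a.r ∧ b.prev = some a.last ∧
  b.run = a.r - a.l + 1 ∧ b.odd = (rsums cost a.l a.r).1 ∧ b.even = (rsums cost a.l a.r).2

def Aiter (sl : List Char) (cost : List Int) (c0 : Char) (m : Nat) : StA :=
  (PySem.List.pyRange 1 (m : Int) 1).foldl (stepA sl cost) ⟨0, 0, 0, c0⟩

def Biter (sl : List Char) (cost : List Int) (m : Nat) : StB :=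
  (PySem.List.pyRange 0 (m : Int) 1).foldl (stepB sl cost) ⟨0, 0, 0, 0, none⟩

lemma Aiter_succ (sl : List Char) (cost : List Int) (c0 : Char) (m : Nat) (hm : 1 ≤ m) :
    Aiter sl cost c0 (m + 1) = stepA sl cost (Aiter sl cost c0 m) (m : Int) := by
  unfold Aiter
  rw [show ((m + 1 : Nat) : Int) = (m : Int) + 1 by push_cast; ring,
      PySem.List.pyRange_one_succ_right (by exact_mod_cast hm), List.foldl_append]
  rfl

lemma Biter_succ (sl : List Char) (cost : List Int) (m : Nat) :
    Biter sl cost (m + 1) = stepB sl cost (Biter sl cost m) (m : Int) := by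
  unfold Biter
  rw [show ((m + 1 : Nat) : Int) = (m : Int) + 1 by push_cast; ring,
      PySem.List.pyRange_one_succ_right (by exact_mod_cast Nat.zero_le m), List.foldl_append]
  rfl

lemma step_rel (sl : List Char) (cost : List Int) (a : StA) (b : StB) (i : Int) (c : Char)
    (hi : 0 ≤ i) (hget : PySem.List.pyGet? sl i = some c) (hr : a.r = i - 1)
    (h : RelAB cost a b) :
    RelAB cost (stepA sl cost a i) (stepB sl cost b i) ∧ (stepA sl cost a i).r = i := by
  obtain ⟨rtn, l, r, last⟩ := a
  obtain ⟨rtnB, even, odd, run, prev⟩ := b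
  obtain ⟨h1, h2, h3, h4, h5, h6, h7⟩ := h
  simp only at h1 h2 h3 h4 h5 h6 h7 hr
  subst h1 h4 hr
  have him : (i : Int) - 1 + 1 = i := by ring
  by_cases hc : c = last
  · subst hc
    have hrs := rsums_succ cost l (i - 1) (by omega)
    rw [him] at hrs
    simp only [stepA, stepB, hget, beq_self_eq_true, if_true, him]
    by_cases hpar : PySem.Int.mod i 2 = 0
    · have hparT : (PySem.Int.mod i 2 == 0) = true := by rw [beq_iff_eq]; exact hpar
      have hdvd : (2 : Int) ∣ i := (PySem.Int.mod_eq_zero_iff_dvd i 2).mp hpar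
      simp only [hparT, reduceIte]
      refine ⟨⟨rfl, h2, ?_, rfl, ?_, ?_, ?_⟩, trivial⟩
      · dsimp only; omega
      · dsimp only; omega
      · dsimp only; rw [hrs]; simp [rstepA, hdvd, h6]
      · dsimp only; rw [hrs]; simp [rstepA, hdvd, h7]
    · have hparF : (PySem.Int.mod i 2 == 0) = false := by rw [beq_eq_false_iff_ne]; exact hpar
      have hndvd : ¬ (2 : Int) ∣ i := fun hd => hpar ((PySem.Int.mod_eq_zero_iff_dvd i 2).mpr hd)
      simp only [hparF, Bool.false_eq_true, reduceIte]
      refine ⟨⟨rfl, h2, ?_, rfl, ?_, ?_, ?_⟩, trivial⟩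
      · dsimp only; omega
      · dsimp only; omega
      · dsimp only; rw [hrs]; simp [rstepA, hndvd, h6]
      · dsimp only; rw [hrs]; simp [rstepA, hndvd, h7]
  · have hb : ((some last == some c) = false) := by
      simp only [beq_eq_false_iff_ne, ne_eq, Option.some.injEq]
      intro h; exact hc h.symm
    have hcl : (c == last) = false := by simp [hc]
    have hflush : (if run > 1 then rtn + min even odd else rtn)
        = (if l ≠ i - 1 then rtn + removeA cost l (i - 1) else rtn) := by
      rw [removeA_eq, ← h6, ← h7, min_comm]
      by_cases hli : l = i - 1
      · simp [hli, h5]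
      · simp [hli, show run > 1 from by omega]
    simp only [stepA, stepB, hget, hcl, hb, Bool.false_eq_true, reduceIte]
    have hrs := rsums_self cost i
    by_cases hpar : PySem.Int.mod i 2 = 0
    · have hparT : (PySem.Int.mod i 2 == 0) = true := by rw [beq_iff_eq]; exact hpar
      have hdvd : (2 : Int) ∣ i := (PySem.Int.mod_eq_zero_iff_dvd i 2).mp hpar
      simp only [hparT, reduceIte]
      refine ⟨⟨?_, hi, le_refl i, rfl, ?_, ?_, ?_⟩, trivial⟩
      · dsimp only; rw [← hflush]
      · dsimp only; omega
      · dsimp only; rw [hrs]; simp [rstepA, hdvd]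
      · dsimp only; rw [hrs]; simp [rstepA, hdvd]
    · have hparF : (PySem.Int.mod i 2 == 0) = false := by rw [beq_eq_false_iff_ne]; exact hpar
      have hndvd : ¬ (2 : Int) ∣ i := fun hd => hpar ((PySem.Int.mod_eq_zero_iff_dvd i 2).mpr hd)
      simp only [hparF, Bool.false_eq_true, reduceIte]
      refine ⟨⟨?_, hi, le_refl i, rfl, ?_, ?_, ?_⟩, trivial⟩
      · dsimp only; rw [← hflush]
      · dsimp only; omega
      · dsimp only; rw [hrs]; simp [rstepA, hndvd]
      · dsimp only; rw [hrs]; simp [rstepA, hndvd]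

lemma iter_rel (sl : List Char) (cost : List Int) (c0 : Char)
    (h0 : PySem.List.pyGet? sl 0 = some c0) (hls : cost.length ≤ sl.length) :
    ∀ m : Nat, 1 ≤ m → m ≤ cost.length →
      RelAB cost (Aiter sl cost c0 m) (Biter sl cost m) ∧
        (Aiter sl cost c0 m).r = (m : Int) - 1 := by
  intro m
  induction m with
  | zero => intro h; omega
  | succ m ih =>
    intro _ hm1
    by_cases hm : 1 ≤ m
    · obtain ⟨hrel, hr⟩ := ih hm (by omega)
      have hmlt : m < sl.length := by omega
      have hget : PySem.List.pyGet? sl (m : Int) = some sl[m] := by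
        rw [PySem.List.pyGet?_natCast]
        exact List.getElem?_eq_getElem hmlt
      rw [Aiter_succ sl cost c0 m hm, Biter_succ sl cost m]
      have := step_rel sl cost (Aiter sl cost c0 m) (Biter sl cost m) (m : Int) sl[m]
        (by exact_mod_cast Nat.zero_le m) hget (by omega) hrel
      exact ⟨this.1, by rw [this.2]; push_cast; ring⟩
    · -- base case m + 1 = 1
      have hm0 : m = 0 := by omega
      subst hm0
      have hA : Aiter sl cost c0 1 = ⟨0, 0, 0, c0⟩ := by
        unfold Aiter
        rw [show ((1 : Nat) : Int) = 1 by norm_num, PySem.List.pyRange_one_eq_nil le_rfl]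
        rfl
      have hB1 : Biter sl cost 1 = stepB sl cost ⟨0, 0, 0, 0, none⟩ 0 := by
        unfold Biter
        rw [show ((1 : Nat) : Int) = 0 + 1 by norm_num, PySem.List.pyRange_one_singleton]
        rfl
      have hB : Biter sl cost 1 = ⟨0, PySem.List.pyGetD cost 0 0, 0, 1, some c0⟩ := by
        rw [hB1]
        simp [stepB, h0, PySem.Int.mod]
      rw [hA, hB]
      refine ⟨⟨rfl, le_rfl, le_rfl, rfl, by norm_num, ?_, ?_⟩, by norm_num⟩
      · rw [rsums_self cost 0]
        simp [rstepA, PySem.Int.mod]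
      · rw [rsums_self cost 0]
        simp [rstepA, PySem.Int.mod]

-- ===== VERDICT (by name: the statement is the Claim_ definition above) =====
theorem minCostold_spec : Claim_equal_minCostold := by
  intro s cost _ hpre
  obtain ⟨hne, hlen⟩ := hpre
  unfold Spec_minCostold
  have h0 : PySem.List.pyGet? s.toList 0 = some (s.toList.headI) := by
    rw [PySem.List.pyGet?_zero]
    cases h : s.toList with
    | nil => exact absurd h hne
    | cons x xs => simp [h, List.headI]
  by_cases hc : cost.length = 0
  · unfold minCostold minCostold_alt
    rw [h0, hc]
    dsimp only
    simp [Aiter, Biter, PySem.List.pyRange_one_eq_nil (by norm_num : (0:Int) ≤ 1),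
      PySem.List.pyRange_zero]
  · have hm1 : 1 ≤ cost.length := by omega
    obtain ⟨hrel, _⟩ := iter_rel s.toList cost s.toList.headI h0 hlen cost.length hm1 le_rfl
    unfold minCostold minCostold_alt
    rw [h0]
    dsimp only
    have hAi : (PySem.List.pyRange 1 (cost.length : Int) 1).foldl
        (stepA s.toList cost) ⟨0, 0, 0, s.toList.headI⟩ = Aiter s.toList cost s.toList.headI cost.length := rfl
    have hBi : (PySem.List.pyRange 0 (cost.length : Int) 1).foldl
        (stepB s.toList cost) ⟨0, 0, 0, 0, none⟩ = Biter s.toList cost cost.length := rfl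
    rw [hAi, hBi]
    set a := Aiter s.toList cost s.toList.headI cost.length
    set b := Biter s.toList cost cost.length
    obtain ⟨h1, h2, h3, h4, h5, h6, h7⟩ := hrel
    rw [removeA_eq, ← h6, ← h7, min_comm, h1]
    by_cases hli : a.l = a.r
    · simp [hli, show ¬ (b.run > 1) by omega]
    · simp [hli, show b.run > 1 by omega]
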